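-- pv_equiv track=rewrite | github.com/BartekDomanowski/PPPD | 2020-MAT-03.py | usun_zera
-- ===== SOURCE A (Python) =====
-- def usun_zera(n: int) -> int:
--     wynik: int = 0
--     potega_10: int = 1
--     while n > 0:
--         if n % 10 != 0:
--             wynik = potega_10 * (n % 10) + wynik
--             potega_10 *= 10
--         n //= 10
--     return wynik
-- ===== SOURCE B (Python) =====
-- def usun_zera(n: int) -> int:
--     if n <= 0:
--         return 0
--     rest = usun_zera(n // 10)
--     d = n % 10
--     return rest * 10 + d if d else rest
-- ===== Notes on version B (the rewrite author's own statement) =====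
-- stated objective: simpler
-- what changed: Replaces A's iterative while-loop with two accumulators (result plus a growing power-of-ten weight, rebuilding the number low-digit-first) by a short structural recursion on the quotient by ten that appends each nonzero digit Horner-style, with the non-positive case as the single base case.
import Mathlib
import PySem

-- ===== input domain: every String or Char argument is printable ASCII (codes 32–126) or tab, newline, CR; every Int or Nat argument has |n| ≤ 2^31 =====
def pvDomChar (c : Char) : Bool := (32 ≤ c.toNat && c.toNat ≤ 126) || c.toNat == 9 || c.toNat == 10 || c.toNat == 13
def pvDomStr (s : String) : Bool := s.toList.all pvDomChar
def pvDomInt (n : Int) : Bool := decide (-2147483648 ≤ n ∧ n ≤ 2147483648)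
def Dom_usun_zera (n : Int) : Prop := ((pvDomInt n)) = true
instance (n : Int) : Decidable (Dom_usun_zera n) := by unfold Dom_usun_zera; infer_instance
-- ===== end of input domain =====

-- B removes zero digits by structural recursion on n // 10 (Horner-style rest*10+d),
-- replacing A's while loop with separate result and power-of-ten accumulators; objective: simpler.

-- ===== PORT A =====
-- the 'while n > 0' loop of A, with its two accumulators; n //= 10 each round
def usunZeraLoop (n wynik potega_10 : Int) : Int :=
  if h : 0 < n then
    let w' := if PySem.Int.mod n 10 ≠ 0 then potega_10 * PySem.Int.mod n 10 + wynik else wynik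
    let p' := if PySem.Int.mod n 10 ≠ 0 then potega_10 * 10 else potega_10
    usunZeraLoop (PySem.Int.floordiv n 10) w' p'
  else wynik
termination_by n.toNat
decreasing_by
  have h1 : PySem.Int.floordiv n 10 = n / 10 := PySem.Int.floordiv_eq_ediv_of_pos (by omega)
  rw [h1]; omega

def usun_zera (n : Int) : Int := usunZeraLoop n 0 1

-- ===== PORT B =====
def usun_zera_alt (n : Int) : Int :=
  if h : n ≤ 0 then 0
  else
    let rest := usun_zera_alt (PySem.Int.floordiv n 10)
    let d := PySem.Int.mod n 10
    if d ≠ 0 then rest * 10 + d else rest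
termination_by n.toNat
decreasing_by
  have h1 : PySem.Int.floordiv n 10 = n / 10 := PySem.Int.floordiv_eq_ediv_of_pos (by omega)
  rw [h1]; omega

-- ===== PRECONDITION & SPEC =====
def Spec_usun_zera (n : Int) (out : Int) : Prop := out = usun_zera_alt n
instance (n : Int) (out : Int) : Decidable (Spec_usun_zera n out) := by unfold Spec_usun_zera; infer_instance

-- ===== CLAIM (what is proved, stated in full; the proofs are below) =====
def Claim_equal_usun_zera : Prop := ∀ (n : Int), Dom_usun_zera n → Spec_usun_zera n (usun_zera n)

-- ===== LEMMAS AND PROOFS =====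

-- loop invariant: A's loop computes B's value scaled by the pending power plus the accumulator
theorem usunZeraLoop_eq (n : Int) : ∀ (w p : Int),
    usunZeraLoop n w p = usun_zera_alt n * p + w := by
  by_cases h : 0 < n
  · have h1 : PySem.Int.floordiv n 10 = n / 10 := PySem.Int.floordiv_eq_ediv_of_pos (by omega)
    have hlt : (n / 10).toNat < n.toNat := by omega
    intro w p
    have ih := usunZeraLoop_eq (PySem.Int.floordiv n 10)
    rw [usunZeraLoop, dif_pos h, ih]
    conv_rhs => rw [usun_zera_alt, dif_neg (by omega : ¬ n ≤ 0)]
    by_cases hd : PySem.Int.mod n 10 = 0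
    · simp only [hd, ne_eq, not_true_eq_false, ite_false]
    · simp only [hd, ne_eq, not_false_eq_true, ite_true]; ring
  · intro w p
    rw [usunZeraLoop, dif_neg h, usun_zera_alt, dif_pos (by omega : n ≤ 0)]
    ring
termination_by n.toNat
decreasing_by
  rw [PySem.Int.floordiv_eq_ediv_of_pos (by omega : (0:Int) < 10)]; omega

-- ===== VERDICT (by name: the statement is the Claim_ definition above) =====
theorem usun_zera_spec : Claim_equal_usun_zera := by
  intro n _
  unfold Spec_usun_zera usun_zera
  rw [usunZeraLoop_eq]
  ring
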